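-- pv_equiv track=rewrite | github.com/k1ll3rb1z/aoc2024 | day21.py | optim_res
-- ===== SOURCE A (Python) =====
-- def optim_res(codes):
--     char_count={}
--     c_max=0
--     for r in codes:
--         char_count[r]=0
--         l=len(r)
--         for i,c in enumerate(r):
--             if i<l-1:
--                 if c == r[i+1]:
--                     char_count[r]+=1
--                     if char_count[r] > c_max:
--                         c_max=char_count[r]
--         codes=[]
--         for r in char_count:
--             if char_count[r] == c_max:
--                 codes.append(r)
--
--     return codes
-- ===== SOURCE B (Python) =====
-- def optim_res(codes):
--     by_count = {}
--     for r in dict.fromkeys(codes):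
--         cnt = sum(a == b for a, b in zip(r, r[1:]))
--         by_count.setdefault(cnt, []).append(r)
--     if not by_count:
--         return codes
--     return by_count[max(by_count)]
-- ===== Notes on version B (the rewrite author's own statement) =====
-- stated objective: faster
-- what changed: B deduplicates the codes once (dict.fromkeys), groups them into a count-keyed bucket table in a single pass, and looks up the max-key bucket once at the end, removing A's rebuild of the whole candidate list after every element.
import Mathlib
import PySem

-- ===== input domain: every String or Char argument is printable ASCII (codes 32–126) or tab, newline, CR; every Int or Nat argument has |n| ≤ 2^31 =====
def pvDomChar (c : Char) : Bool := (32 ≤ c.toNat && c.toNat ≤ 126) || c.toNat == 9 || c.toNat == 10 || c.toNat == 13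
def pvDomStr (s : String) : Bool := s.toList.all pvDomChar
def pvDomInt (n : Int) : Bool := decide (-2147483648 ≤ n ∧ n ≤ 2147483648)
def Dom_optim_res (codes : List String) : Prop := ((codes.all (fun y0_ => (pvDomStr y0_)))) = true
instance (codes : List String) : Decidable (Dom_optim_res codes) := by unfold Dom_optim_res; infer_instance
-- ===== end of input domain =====

-- B deduplicates the codes once, groups them into count-keyed buckets and returns the
-- max-count bucket once at the end, instead of A's rebuild of the answer list after every element; objective: faster (measured).

-- ===== PORT A =====
-- inner loop 'for i,c in enumerate(r): ...' — counts adjacent equal chars, tracks the running max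
def pvInnerStep (r : String) (p : PySem.Dict String Int × Int) (ic : Int × Char) :
    PySem.Dict String Int × Int :=
  if ic.1 < PySem.Str.len r - 1 then
    if some ic.2 == PySem.Str.pyGet? r (ic.1 + 1) then
      let cc := p.1.modify r 0 (· + 1)
      (cc, if cc.getD r 0 > p.2 then cc.getD r 0 else p.2)
    else p
  else p

-- 'codes=[]; for r in char_count: if char_count[r]==c_max: codes.append(r)'
def pvRebuild (cc : PySem.Dict String Int) (cmax : Int) : List String :=
  cc.keys.foldl (fun acc k => if cc.getD k 0 == cmax then acc ++ [k] else acc) []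

def pvOuterStep (st : PySem.Dict String Int × Int × List String) (r : String) :
    PySem.Dict String Int × Int × List String :=
  let cc0 := st.1.insert r 0
  let inner := (PySem.List.enumerate r.toList 0).foldl (pvInnerStep r) (cc0, st.2.1)
  (inner.1, inner.2, pvRebuild inner.1 inner.2)

def optim_res (codes : List String) : List String :=
  (codes.foldl pvOuterStep (PySem.Dict.empty, 0, codes)).2.2

-- ===== PORT B =====
-- cnt = sum(a == b for a, b in zip(r, r[1:]))
def pvCnt (r : String) : Int :=
  ((r.toList.zip (PySem.Str.slice r (some 1) none).toList).map
    (fun p => if p.1 == p.2 then (1 : Int) else 0)).sum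

def optim_res_alt (codes : List String) : List String :=
  let by_count :=
    (PySem.List.dedup codes).foldl
      (fun (d : PySem.Dict Int (List String)) r => d.modify (pvCnt r) [] (· ++ [r]))
      PySem.Dict.empty
  if by_count.items.isEmpty then codes
  else
    match PySem.List.max? by_count.keys (fun k => k) with
    | some m => by_count.getD m []
    | none => []

-- ===== PRECONDITION & SPEC =====
def Spec_optim_res (codes : List String) (out : List String) : Prop := out = optim_res_alt codes
instance (codes : List String) (out : List String) : Decidable (Spec_optim_res codes out) := by unfold Spec_optim_res; infer_instance

-- ===== CLAIM (what is proved, stated in full; the proofs are below) =====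
def Claim_equal_optim_res : Prop := ∀ (codes : List String), Dom_optim_res codes → Spec_optim_res codes (optim_res codes)

-- ===== LEMMAS AND PROOFS =====

-- number of adjacent equal character pairs
def pvAdj : List Char → Nat
  | a :: b :: t => (if a == b then 1 else 0) + pvAdj (b :: t)
  | _ => 0

theorem pv_keys_contains {κ ν : Type} [BEq κ] [LawfulBEq κ] (d : PySem.Dict κ ν) (k : κ) :
    PySem.Set.contains d.keys k = d.contains k := by
  show List.contains _ _ = _
  simp only [PySem.Dict.keys, PySem.Dict.contains, List.contains_eq_any_beq, List.any_map]
  rcases d with ⟨items⟩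
  induction items with
  | nil => rfl
  | cons p t ih =>
    simp only [List.any_cons, ih]
    by_cases h : p.1 = k
    · simp only [Function.comp_apply]
      simp [h]
    · have h2 : ¬ k = p.1 := fun e => h e.symm
      simp only [Function.comp_apply]
      rw [show (k == p.1) = false from beq_eq_false_iff_ne.mpr h2,
          show (p.1 == k) = false from beq_eq_false_iff_ne.mpr h]

theorem keys_insert' {κ ν : Type} [BEq κ] [LawfulBEq κ] (d : PySem.Dict κ ν) (k : κ) (v : ν) :
    (d.insert k v).keys = PySem.Set.add d.keys k := by
  unfold PySem.Set.add
  rw [pv_keys_contains]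
  by_cases h : d.contains k = true
  · simp only [h, if_pos, PySem.Dict.insert, PySem.Dict.keys, List.map_map]
    apply List.map_congr_left; intro p hp
    by_cases hpk : (p.1 == k) = true <;> simp [hpk]
    exact (eq_of_beq hpk).symm
  · simp only [h, PySem.Dict.insert, PySem.Dict.keys, Bool.false_eq_true, if_false]
    simp

theorem keys_insert_contained {κ ν : Type} [BEq κ] [LawfulBEq κ] (d : PySem.Dict κ ν) (k : κ) (v : ν)
    (h : d.contains k = true) : (d.insert k v).keys = d.keys := by
  rw [keys_insert']
  unfold PySem.Set.add
  rw [pv_keys_contains, h]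
  simp

theorem pvInner_spec (r : String) (cs : List Char) : ∀ (n : Nat), cs = r.toList.drop n →
    ∀ (d : PySem.Dict String Int) (x v : Int),
    d.contains r = true → d.getD r 0 = v → v ≤ x →
    ((PySem.List.enumerate cs (n : Int)).foldl (pvInnerStep r) (d, x)).1.keys = d.keys ∧
    ((PySem.List.enumerate cs (n : Int)).foldl (pvInnerStep r) (d, x)).1.contains r = true ∧
    (∀ s : String, s ≠ r → ((PySem.List.enumerate cs (n : Int)).foldl (pvInnerStep r) (d, x)).1.getD s 0 = d.getD s 0) ∧
    ((PySem.List.enumerate cs (n : Int)).foldl (pvInnerStep r) (d, x)).1.getD r 0 = v + pvAdj cs ∧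
    ((PySem.List.enumerate cs (n : Int)).foldl (pvInnerStep r) (d, x)).2 = max x (v + pvAdj cs) := by
  induction cs with
  | nil =>
    intro n _ d x v hc hv hvx
    simp [PySem.List.enumerate, pvAdj, hv, max_eq_left hvx, hc]
  | cons c cs' ih =>
    intro n hcs d x v hc hv hvx
    have hlen : cs'.length + 1 + n = r.toList.length := by
      have := congrArg List.length hcs
      simp only [List.length_cons, List.length_drop] at this
      omega
    have henum : PySem.List.enumerate (c :: cs') (n : Int) =
        ((n : Int), c) :: PySem.List.enumerate cs' ((n : Int) + 1) := by
      simp [PySem.List.enumerate]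
    have hcs' : cs' = r.toList.drop (n + 1) := by
      have : (r.toList.drop n).tail = r.toList.drop (n + 1) := by
        rw [← List.drop_drop]; simp
      rw [← this, ← hcs]; rfl
    have hcast : (n : Int) + 1 = ((n + 1 : Nat) : Int) := by push_cast; ring
    cases cs' with
    | nil =>
      -- last character: i = l - 1, guard false
      have hlen1 : n + 1 = r.toList.length := by simp only [List.length_nil] at hlen; omega
      have hguard : ¬ ((n : Int) < PySem.Str.len r - 1) := by
        rw [PySem.Str.len_eq]; omega
      rw [henum, List.foldl_cons]
      have hstep : pvInnerStep r (d, x) ((n : Int), c) = (d, x) := by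
        simp only [pvInnerStep]
        rw [if_neg hguard]
      rw [hstep]
      simp [PySem.List.enumerate, pvAdj, hv, max_eq_left hvx, hc]
    | cons b t =>
      have hlen1 : (b :: t).length + 1 + n = r.toList.length := hlen
      have hguard : (n : Int) < PySem.Str.len r - 1 := by
        rw [PySem.Str.len_eq]
        simp only [List.length_cons] at hlen1
        omega
      have hget : PySem.Str.pyGet? r ((n : Int) + 1) = some b := by
        rw [hcast, PySem.Str.pyGet?_natCast]
        have : r.toList.drop (n + 1) = b :: t := hcs'.symm
        have h0 : r.toList[(n+1) + 0]? = (b :: t)[0]? := by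
          rw [← List.getElem?_drop, this]
        simpa using h0
      rw [henum, List.foldl_cons]
      by_cases hcb : (c == b) = true
      · have hstep : pvInnerStep r (d, x) ((n : Int), c) =
            (d.modify r 0 (· + 1), if v + 1 > x then v + 1 else x) := by
          simp only [pvInnerStep, if_pos hguard, hget]
          rw [show (some c == some b) = true from by simp [hcb]]
          simp [PySem.Dict.getD_modify_self, hv]
        rw [hstep]
        have hc2 : (d.modify r 0 (· + 1)).contains r = true := by
          rw [PySem.Dict.contains_modify]; simp
        have hv2 : (d.modify r 0 (· + 1)).getD r 0 = v + 1 := by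
          rw [PySem.Dict.getD_modify_self, hv]
        have hvx2 : v + 1 ≤ (if v + 1 > x then v + 1 else x) := by split <;> omega
        obtain ⟨k1, k2, k3, k4, k5⟩ := ih (n+1) hcs' (d.modify r 0 (· + 1))
          (if v + 1 > x then v + 1 else x) (v+1) hc2 hv2 hvx2
        rw [← hcast] at k1 k2 k3 k4 k5
        refine ⟨?_, k2, ?_, ?_, ?_⟩
        · rw [k1, PySem.Dict.keys_modify, keys_insert_contained _ _ _ hc]
        · intro s hs
          rw [k3 s hs, PySem.Dict.getD_modify d r s 0 (· + 1), if_neg hs]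
        · rw [k4]
          have : pvAdj (c :: b :: t) = 1 + pvAdj (b :: t) := by simp [pvAdj, hcb]
          rw [this]; push_cast; ring
        · rw [k5]
          have : pvAdj (c :: b :: t) = 1 + pvAdj (b :: t) := by simp [pvAdj, hcb]
          rw [this]
          have hadj : (0 : Int) ≤ pvAdj (b :: t) := by positivity
          rcases le_total (v+1) x with h1 | h1 <;>
            · push_cast
              rcases le_total x (v + (1 + pvAdj (b :: t))) with h2 | h2 <;>
                simp [max_def] <;> split <;> omega
      · have hstep : pvInnerStep r (d, x) ((n : Int), c) = (d, x) := by
          simp only [pvInnerStep, if_pos hguard, hget]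
          rw [show (some c == some b) = false from by simp_all]
          simp
        rw [hstep]
        obtain ⟨k1, k2, k3, k4, k5⟩ := ih (n+1) hcs' d x v hc hv hvx
        rw [← hcast] at k1 k2 k3 k4 k5
        have hadj : pvAdj (c :: b :: t) = pvAdj (b :: t) := by simp [pvAdj, hcb]
        exact ⟨k1, k2, k3, by rw [k4, hadj], by rw [k5, hadj]⟩

theorem pvOuter_spec (rest : List String) : ∀ (cc : PySem.Dict String Int) (x : Int)
    (out0 : List String), 0 ≤ x →
    (rest.foldl pvOuterStep (cc, x, out0)).1.keys = PySem.Set.update cc.keys rest ∧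
    (∀ s : String, (rest.foldl pvOuterStep (cc, x, out0)).1.getD s 0 =
      if s ∈ rest then (pvAdj s.toList : Int) else cc.getD s 0) ∧
    (rest.foldl pvOuterStep (cc, x, out0)).2.1 =
      rest.foldl (fun a s => max a (pvAdj s.toList : Int)) x ∧
    (rest.foldl pvOuterStep (cc, x, out0)).2.2 =
      (if rest = [] then out0 else
        pvRebuild (rest.foldl pvOuterStep (cc, x, out0)).1 (rest.foldl pvOuterStep (cc, x, out0)).2.1) := by
  induction rest with
  | nil =>
    intro cc x out0 _
    refine ⟨rfl, by simp, rfl, rfl⟩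
  | cons r rest' ih =>
    intro cc x out0 hx
    rw [List.foldl_cons]
    have hc0 : (cc.insert r 0).contains r = true := by
      rw [PySem.Dict.contains_insert]; simp
    have hv0 : (cc.insert r 0).getD r 0 = 0 := PySem.Dict.getD_insert_self cc r 0 0
    obtain ⟨k1, k2, k3, k4, k5⟩ := pvInner_spec r r.toList 0 (by simp) (cc.insert r 0) x 0 hc0 hv0 hx
    simp only [Nat.cast_zero] at k1 k2 k3 k4 k5
    have hstep : pvOuterStep (cc, x, out0) r =
        (((PySem.List.enumerate r.toList 0).foldl (pvInnerStep r) (cc.insert r 0, x)).1,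
         ((PySem.List.enumerate r.toList 0).foldl (pvInnerStep r) (cc.insert r 0, x)).2,
         pvRebuild ((PySem.List.enumerate r.toList 0).foldl (pvInnerStep r) (cc.insert r 0, x)).1
           ((PySem.List.enumerate r.toList 0).foldl (pvInnerStep r) (cc.insert r 0, x)).2) := rfl
    rw [hstep]
    have hx' : 0 ≤ ((PySem.List.enumerate r.toList 0).foldl (pvInnerStep r) (cc.insert r 0, x)).2 := by
      rw [k5]; exact le_trans hx (le_max_left _ _)
    obtain ⟨m1, m2, m3, m4⟩ := ih _ _ _ hx'
    refine ⟨?_, ?_, ?_, ?_⟩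
    · rw [m1, k1, keys_insert' cc r 0]
      rfl
    · intro s
      rw [m2 s]
      by_cases hs' : s ∈ rest'
      · simp [hs']
      · by_cases hsr : s = r
        · subst hsr
          simp [hs', k4]
        · rw [if_neg hs', k3 s hsr, PySem.Dict.getD_insert_of_ne cc 0 0 hsr]
          simp [hs', hsr]
    · rw [m3, k5]
      simp [List.foldl_cons]
    · rw [m4]
      by_cases hr' : rest' = []
      · subst hr'
        simp
      · simp [hr']

theorem pvAdj_eq_countP (cs : List Char) :
    pvAdj cs = (cs.zip cs.tail).countP (fun p => p.1 == p.2) := by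
  match cs with
  | [] => rfl
  | [a] => rfl
  | a :: b :: t =>
    simp [pvAdj, pvAdj_eq_countP (b :: t), List.countP_cons]
    omega

theorem pvCnt_eq (r : String) : pvCnt r = (pvAdj r.toList : Int) := by
  have h1 : (PySem.Str.slice r (some 1) none).toList = r.toList.drop 1 := by
    simp [pysem, PySem.List.slice_from r.toList (by norm_num : (0:Int) ≤ 1)]
  rw [pvCnt, h1, List.drop_one, PySem.List.sum_map_ite_one_zero, pvAdj_eq_countP]

theorem foldl_max_mem (l : List Int) (a : Int) : l.foldl max a = a ∨ l.foldl max a ∈ l := by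
  induction l generalizing a with
  | nil => simp
  | cons b t ih =>
    rw [List.foldl_cons]
    rcases ih (max a b) with h | h
    · rw [h]
      rcases max_choice a b with hm | hm
      · left; exact hm
      · right; rw [hm]; exact List.mem_cons_self ..
    · right; exact List.mem_cons_of_mem _ h

theorem pvRebuild_eq (D : PySem.Dict String Int) (M : Int) :
    pvRebuild D M = D.keys.filter (fun k => D.getD k 0 == M) := by
  unfold pvRebuild
  rw [PySem.List.foldl_append_if (fun k => D.getD k 0 == M) (fun k => k) D.keys []]
  simp

theorem main_eq (codes : List String) : optim_res codes = optim_res_alt codes := by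
  cases codes with
  | nil => rfl
  | cons c cs =>
    -- abbreviations
    obtain ⟨k1, k2, k3, k4⟩ := pvOuter_spec (c :: cs) PySem.Dict.empty 0 (c :: cs) le_rfl
    set res := (c :: cs).foldl pvOuterStep (PySem.Dict.empty, 0, c :: cs) with hres
    set M := (c :: cs).foldl (fun a s => max a (pvAdj s.toList : Int)) 0 with hM
    have hkeysA : res.1.keys = PySem.Set.ofList (c :: cs) := by
      rw [k1]; rfl
    -- A's result
    have hA : optim_res (c :: cs) =
        (PySem.Set.ofList (c :: cs)).filter (fun k => ((pvAdj k.toList : Int)) == M) := by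
      show res.2.2 = _
      rw [k4, if_neg (by simp), pvRebuild_eq, ← k3, hkeysA]
      apply List.filter_congr
      intro k hk
      have hk' : k ∈ c :: cs := (PySem.Set.mem_ofList _ _).mp hk
      rw [k2 k, if_pos hk']
    -- B's dictionary
    set l := PySem.List.dedup (c :: cs) with hl
    set bc := l.foldl
      (fun (d : PySem.Dict Int (List String)) r => d.modify (pvCnt r) [] (· ++ [r]))
      PySem.Dict.empty with hbc
    have hlofl : l = PySem.Set.ofList (c :: cs) := rfl
    have hkeysB : bc.keys = PySem.Set.ofList (l.map pvCnt) := by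
      rw [hbc, PySem.Dict.keys_foldl_modify_key l pvCnt [] (fun _ r v => v ++ [r]) PySem.Dict.empty]
      rfl
    have hcmem : pvCnt c ∈ bc.keys := by
      rw [hkeysB]
      exact (PySem.Set.mem_ofList _ _).mpr (List.mem_map_of_mem (by
        rw [hlofl]; exact (PySem.Set.mem_ofList _ _).mpr (List.mem_cons_self)))
    have hkeysne : bc.keys ≠ [] := by
      intro h; rw [h] at hcmem; exact List.not_mem_nil hcmem
    have hitems : bc.items.isEmpty = false := by
      rcases h : bc.items with _ | _
      · exfalso; apply hkeysne; show bc.items.map _ = []; rw [h]; rfl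
      · rfl
    -- the max key
    rcases hmx : PySem.List.max? bc.keys (fun k => k) with _ | m
    · exact absurd ((PySem.List.max?_eq_none_iff _ _).mp hmx) hkeysne
    -- M is the fold of max over the adjacency counts
    have hMfold : M = ((c :: cs).map (fun s => (pvAdj s.toList : Int))).foldl max 0 := by
      rw [hM, List.foldl_map]
    have hadj_nonneg : ∀ s : String, (0:Int) ≤ (pvAdj s.toList : Int) := fun s => Int.natCast_nonneg _
    have hkey_iff : ∀ y : Int, y ∈ bc.keys ↔ ∃ s ∈ c :: cs, (pvAdj s.toList : Int) = y := by
      intro y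
      rw [hkeysB, PySem.Set.mem_ofList, List.mem_map]
      constructor
      · rintro ⟨s, hs, hy⟩
        exact ⟨s, by rw [hlofl] at hs; exact (PySem.Set.mem_ofList _ _).mp hs, by rw [← pvCnt_eq]; exact hy⟩
      · rintro ⟨s, hs, hy⟩
        exact ⟨s, by rw [hlofl]; exact (PySem.Set.mem_ofList _ _).mpr hs, by rw [pvCnt_eq]; exact hy⟩
    have hMle : ∀ y ∈ bc.keys, y ≤ M := by
      intro y hy
      obtain ⟨s, hs, hys⟩ := (hkey_iff y).mp hy
      rw [hMfold, ← hys]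
      exact (PySem.List.le_foldl_max _ _).2 _ (List.mem_map_of_mem hs)
    have hMmem : M ∈ bc.keys := by
      apply (hkey_iff M).mpr
      rcases foldl_max_mem ((c :: cs).map (fun s => (pvAdj s.toList : Int))) 0 with h | h
      · have hM0 : M = 0 := by rw [hMfold, h]
        have hcle : (pvAdj c.toList : Int) ≤ M := by
          rw [hMfold]
          exact (PySem.List.le_foldl_max _ _).2 _
            (List.mem_map_of_mem (List.mem_cons_self (a := c) (l := cs)))
        have hc0 := hadj_nonneg c
        exact ⟨c, List.mem_cons_self, by omega⟩
      · obtain ⟨s, hs, hys⟩ := List.mem_map.mp h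
        exact ⟨s, hs, by rw [← hMfold] at hys; exact hys⟩
    have hmM : m = M := by
      have h1 : M ≤ m := PySem.List.max?_isMax hmx M hMmem
      have h2 : m ≤ M := hMle m (PySem.List.max?_mem hmx)
      omega
    -- B's bucket content
    have hB : bc.getD m [] = l.filter (fun r => pvCnt r == m) := by
      rw [hbc, ← List.foldl_map (f := fun r => (pvCnt r, r))
        (g := fun (d : PySem.Dict Int (List String)) p => d.modify p.1 [] (· ++ [p.2]))]
      rw [PySem.Dict.getD_foldl_modify_append]
      rw [List.filter_map]
      simp [Function.comp_def]
    -- put everything together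
    have hBalt : optim_res_alt (c :: cs) = bc.getD m [] := by
      show (if bc.items.isEmpty then (c :: cs) else
        match PySem.List.max? bc.keys (fun k => k) with
        | some m => bc.getD m []
        | none => []) = bc.getD m []
      rw [hitems, hmx]
      simp
    rw [hBalt, hA, hB, hlofl]
    apply List.filter_congr
    intro k _
    rw [pvCnt_eq, hmM]

-- ===== VERDICT (by name: the statement is the Claim_ definition above) =====
theorem optim_res_spec : Claim_equal_optim_res := by
  intro codes _
  unfold Spec_optim_res
  exact main_eq codes
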